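-- pv_equiv track=rewrite | github.com/Ubastic/coding-challenges | solutions/python/5 kyu/Bananas/solution.py | bananas_gen
-- ===== SOURCE A (Python) =====
-- def bananas_gen(s: str, expected: str = 'banana'):
--     if not expected:
--         yield "-" * len(s)
--     else:
--         for i, c in enumerate(s):
--             if c == expected[0]:
--                 start = '-' * i + c
--                 yield from (start + part for part in bananas_gen(s[i + 1:], expected[1:]))
-- ===== SOURCE B (Python) =====
-- def bananas_gen(s: str, expected: str = 'banana'):
--     # Iterative BFS over match prefixes with absolute indices, rendering at the end.
--     partial = [(-1, [])]
--     for c in expected: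
--         partial = [(i, ps + [i])
--                    for last, ps in partial
--                    for i in range(last + 1, len(s)) if s[i] == c]
--     for last, ps in partial:
--         out = []
--         prev = -1
--         for k, i in enumerate(ps):
--             out.append('-' * (i - prev - 1))
--             out.append(expected[k])
--             prev = i
--         out.append('-' * (len(s) - prev - 1))
--         yield ''.join(out)
-- ===== Notes on version B (the rewrite author's own statement) =====
-- stated objective: alternative
-- what changed: Replaces the recursion over expected (with string slicing and incremental prefix building) by an iterative level-by-level BFS over absolute match positions, rendering each complete position list into the dash string at the end.
import Mathlib
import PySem

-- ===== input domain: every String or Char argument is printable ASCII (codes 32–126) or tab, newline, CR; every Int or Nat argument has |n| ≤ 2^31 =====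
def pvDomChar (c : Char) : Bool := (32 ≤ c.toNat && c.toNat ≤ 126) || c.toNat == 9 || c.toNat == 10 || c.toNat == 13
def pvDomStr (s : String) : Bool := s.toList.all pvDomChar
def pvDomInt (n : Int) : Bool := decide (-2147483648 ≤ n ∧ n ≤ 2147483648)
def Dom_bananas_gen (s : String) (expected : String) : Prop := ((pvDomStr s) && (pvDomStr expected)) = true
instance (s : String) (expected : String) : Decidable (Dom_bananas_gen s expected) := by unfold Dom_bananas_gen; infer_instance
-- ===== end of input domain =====

-- B replaces A's recursion over `expected` (with string slicing) by an iterative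
-- level-by-level search over absolute match positions, rendering at the end (objective: alternative).
-- Both ports list the values the Python generators yield, in yield order.

-- ===== PORT A =====
-- literal port of A over List Char; the generator's yields are collected in order by the foldl
def bananasA : List Char → List Char → List (List Char)
  | s, [] => [List.replicate s.length '-']
  | s, e :: rest =>
    (PySem.List.enumerate s 0).foldl
      (fun acc p =>
        if p.2 == e then
          -- start = '-' * i + c ; yield from (start + part for part in bananas_gen(s[i+1:], expected[1:]))
          acc ++ (bananasA (PySem.List.slice s (some (p.1 + 1)) none) rest).map
            (fun part => List.replicate p.1.toNat '-' ++ p.2 :: part)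
        else acc) []

def bananas_gen (s : String) (expected : String) : List String :=
  (bananasA s.toList expected.toList).map String.ofList

-- ===== PORT B =====
-- literal port of Source B over List Char.  s[i] is read as getD i.toNat: every generated
-- index i satisfies 0 ≤ i < len(s) (it comes from range(last+1, len(s)) with last ≥ -1),
-- so this is exact; likewise expected[k] with k < len(expected) by construction.
def bananasB (s : List Char) (exp : List Char) : List (List Char) :=
  let part := exp.foldl
    (fun part c =>
      part.flatMap (fun lp =>
        (PySem.List.pyRange (lp.1 + 1) (s.length : Int) 1).flatMap (fun i =>
          if s.getD i.toNat ' ' == c then [(i, lp.2 ++ [i])] else [])))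
    [((-1 : Int), ([] : List Int))]
  part.map (fun lp =>
    let st := (PySem.List.enumerate lp.2 0).foldl
      (fun (st : List Char × Int) ki =>
        (st.1 ++ List.replicate (ki.2 - st.2 - 1).toNat '-' ++ [exp.getD ki.1.toNat ' '], ki.2))
      ([], (-1 : Int))
    st.1 ++ List.replicate ((s.length : Int) - st.2 - 1).toNat '-')

def bananas_gen_alt (s : String) (expected : String) : List String :=
  (bananasB s.toList expected.toList).map String.ofList

-- ===== PRECONDITION & SPEC =====
def Spec_bananas_gen (s : String) (expected : String) (out : List String) : Prop := out = bananas_gen_alt s expected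
instance (s : String) (expected : String) (out : List String) : Decidable (Spec_bananas_gen s expected out) := by unfold Spec_bananas_gen; infer_instance

-- ===== CLAIM (what is proved, stated in full; the proofs are below) =====
def Claim_equal_bananas_gen : Prop := ∀ (s : String) (expected : String), Dom_bananas_gen s expected → Spec_bananas_gen s expected (bananas_gen s expected)

-- ===== LEMMAS AND PROOFS =====

-- positions (absolute, > last) at which c occurs in s
def pvIdxs (s : List Char) (last : Int) (c : Char) : List Int :=
  (PySem.List.pyRange (last + 1) (s.length : Int) 1).filter (fun i => s.getD i.toNat ' ' == c)

-- all strictly increasing position lists matching exp in s, entries > last, in lexicographic order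
def pvPos (s : List Char) : Int → List Char → List (List Int)
  | _, [] => [[]]
  | last, c :: rest => (pvIdxs s last c).flatMap (fun i => (pvPos s i rest).map (i :: ·))

-- render positions ps (entries ≥ k) for the chars of exp, filling with '-' up to length n
def pvRender (n : Int) : List Char → Int → List Int → List Char
  | [], k, _ => List.replicate (n - k).toNat '-'
  | c :: rest, k, i :: ps => List.replicate (i - k).toNat '-' ++ c :: pvRender n rest (i + 1) ps
  | _ :: _, _, [] => []

def pvLastAux (l : Int) : List Int → Int
  | [] => l
  | i :: ps => pvLastAux i ps

lemma pvFlatMap_if_singleton {α β : Type} (l : List α) (p : α → Bool) (f : α → List β) :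
    l.flatMap (fun x => if p x then f x else []) = (l.filter p).flatMap f := by
  induction l with
  | nil => rfl
  | cons a l ih =>
    simp only [List.flatMap_cons, List.filter_cons, ih]
    by_cases h : p a <;> simp [h]

lemma pvPos_length (s : List Char) (exp : List Char) : ∀ (last : Int) (ps : List Int),
    ps ∈ pvPos s last exp → ps.length = exp.length := by
  induction exp with
  | nil => intro last ps h; simp [pvPos] at h; simp [h]
  | cons c rest ih =>
    intro last ps h
    simp only [pvPos, List.mem_flatMap, List.mem_map] at h
    obtain ⟨i, _, q, hq, rfl⟩ := h
    simp [ih i q hq]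

lemma pvEnumFlat {β : Type} : ∀ (l : List Char) (j : Int) (F : Int × Char → List β),
    (PySem.List.enumerate l j).flatMap F
      = (List.range l.length).flatMap (fun (t : Nat) => F (j + (t : Int), l.getD t ' ')) := by
  intro l
  induction l with
  | nil => intro j F; simp [PySem.List.enumerate_nil]
  | cons a l ih =>
    intro j F
    rw [PySem.List.enumerate_cons, List.flatMap_cons, ih]
    rw [List.length_cons, List.range_succ_eq_map, List.flatMap_cons, List.flatMap_map]
    congr 1
    · simp
    · congr 1; funext t
      have e1 : j + ((t + 1 : Nat) : Int) = j + 1 + (t : Int) := by push_cast; ring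
      rw [show Nat.succ t = t + 1 from rfl, e1, List.getD_cons_succ]

lemma pvIdxsFlat {β : Type} (s : List Char) (k : Nat) (hk : k ≤ s.length) (c : Char) (H : Int → List β) :
    (pvIdxs s ((k : Int) - 1) c).flatMap H
      = (List.range (s.length - k)).flatMap
          (fun t => if s.getD (k + t) ' ' == c then H ((k : Int) + (t : Int)) else []) := by
  unfold pvIdxs
  have h1 : (k : Int) - 1 + 1 = (k : Int) := by ring
  rw [h1, ← pvFlatMap_if_singleton, PySem.List.pyRange_one]
  rw [List.flatMap_map]
  have h2 : ((s.length : Int) - (k : Int)).toNat = s.length - k := by omega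
  rw [h2]
  congr 1

lemma pvA_char (s : List Char) : ∀ (exp : List Char) (k : Nat), k ≤ s.length →
    bananasA (s.drop k) exp
      = (pvPos s ((k : Int) - 1) exp).map (pvRender (s.length : Int) exp (k : Int)) := by
  intro exp
  induction exp with
  | nil =>
    intro k hk
    simp only [bananasA, pvPos, pvRender, List.map_cons, List.map_nil, List.length_drop]
    have h2 : ((s.length : Int) - (k : Int)).toNat = s.length - k := by omega
    rw [h2]
  | cons e rest ih =>
    intro k hk
    show (PySem.List.enumerate (s.drop k) 0).foldl _ [] = _
    have hfun : (fun (acc : List (List Char)) (p : Int × Char) =>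
        if p.2 == e then
          acc ++ (bananasA (PySem.List.slice (s.drop k) (some (p.1 + 1)) none) rest).map
            (fun part => List.replicate p.1.toNat '-' ++ p.2 :: part)
        else acc)
      = (fun acc p =>
          acc ++ (if p.2 == e then
            (bananasA (PySem.List.slice (s.drop k) (some (p.1 + 1)) none) rest).map
              (fun part => List.replicate p.1.toNat '-' ++ p.2 :: part)
          else [])) := by
      funext acc p; split <;> simp
    rw [hfun, PySem.List.foldl_append_eq_flatMap, List.nil_append, pvEnumFlat]
    simp only [pvPos, List.map_flatMap]
    rw [pvIdxsFlat s k hk e, List.length_drop]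
    rw [List.flatMap_def, List.flatMap_def]
    congr 1
    apply List.map_congr_left
    intro t ht
    rw [List.mem_range] at ht
    have hg : (s.drop k).getD t ' ' = s.getD (k + t) ' ' := by
      rw [List.getD_eq_getElem?_getD, List.getD_eq_getElem?_getD, List.getElem?_drop]
    rw [hg, zero_add]
    by_cases h : (s.getD (k + t) ' ' == e) = true
    · rw [if_pos h, if_pos h]
      have he : s.getD (k + t) ' ' = e := eq_of_beq h
      have hs : PySem.List.slice (s.drop k) (some ((t : Int) + 1)) none = s.drop (k + t + 1) := by
        rw [PySem.List.slice_from _ (by omega)]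
        have : ((t : Int) + 1).toNat = t + 1 := by omega
        rw [this, List.drop_drop]
        exact rfl
      rw [hs, ih (k + t + 1) (by omega)]
      have e1 : ((k + t + 1 : Nat) : Int) - 1 = (k : Int) + (t : Int) := by push_cast; ring
      rw [e1, List.map_map, List.map_map]
      apply List.map_congr_left
      intro q hq
      simp only [Function.comp_apply]
      rw [he]
      show List.replicate ((t : Int)).toNat '-' ++ e :: pvRender _ rest ((k + t + 1 : Nat) : Int) q
        = pvRender _ (e :: rest) (k : Int) (((k : Int) + (t : Int)) :: q)
      rw [pvRender]
      have e2 : ((k : Int) + (t : Int) - (k : Int)).toNat = t := by omega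
      have e3 : (k : Int) + (t : Int) + 1 = ((k + t + 1 : Nat) : Int) := by push_cast; ring
      rw [e2, e3]
      simp
    · rw [if_neg h, if_neg h]

lemma pvB_levels (s : List Char) : ∀ (exp : List Char) (part : List (Int × List Int)),
    exp.foldl
      (fun part c =>
        part.flatMap (fun lp =>
          (PySem.List.pyRange (lp.1 + 1) (s.length : Int) 1).flatMap (fun i =>
            if s.getD i.toNat ' ' == c then [(i, lp.2 ++ [i])] else []))) part
      = part.flatMap (fun lp =>
          (pvPos s lp.1 exp).map (fun q => (pvLastAux lp.1 q, lp.2 ++ q))) := by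
  intro exp
  induction exp with
  | nil =>
    intro part
    simp [pvPos, pvLastAux]
  | cons c exp ih =>
    intro part
    rw [List.foldl_cons, ih, List.flatMap_assoc]
    congr 1
    funext lp
    rw [List.flatMap_assoc]
    have h1 : ∀ i : Int,
        (if s.getD i.toNat ' ' == c then [(i, lp.2 ++ [i])] else []).flatMap
            (fun lp2 => (pvPos s lp2.1 exp).map (fun q => (pvLastAux lp2.1 q, lp2.2 ++ q)))
          = (if s.getD i.toNat ' ' == c then
              (pvPos s i exp).map (fun q => (pvLastAux i q, (lp.2 ++ [i]) ++ q)) else []) := by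
      intro i; split <;> simp
    simp only [h1]
    rw [pvFlatMap_if_singleton]
    show (pvIdxs s lp.1 c).flatMap _ = _
    simp only [pvPos, List.map_flatMap]
    congr 1
    funext i
    rw [List.map_map]
    apply List.map_congr_left
    intro q hq
    simp [pvLastAux]

lemma pvB_render (n : Int) (exp : List Char) : ∀ (ps : List Int) (k : Nat) (prev : Int) (out : List Char),
    exp.length = k + ps.length →
    ((PySem.List.enumerate ps (k : Int)).foldl
        (fun (st : List Char × Int) ki =>
          (st.1 ++ List.replicate (ki.2 - st.2 - 1).toNat '-' ++ [exp.getD ki.1.toNat ' '], ki.2))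
        (out, prev)).1
      ++ List.replicate
          (n - ((PySem.List.enumerate ps (k : Int)).foldl
            (fun (st : List Char × Int) ki =>
              (st.1 ++ List.replicate (ki.2 - st.2 - 1).toNat '-' ++ [exp.getD ki.1.toNat ' '], ki.2))
            (out, prev)).2 - 1).toNat '-'
      = out ++ pvRender n (exp.drop k) (prev + 1) ps := by
  intro ps
  induction ps with
  | nil =>
    intro k prev out hlen
    have hlen' : exp.length = k := by simpa using hlen
    have hd : exp.drop k = [] := List.drop_eq_nil_of_le (by omega)
    simp [PySem.List.enumerate_nil, hd, pvRender, sub_sub]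
  | cons i ps ih =>
    intro k prev out hlen
    have hk : k < exp.length := by simp at hlen; omega
    have hd : exp.drop k = exp.getD k ' ' :: exp.drop (k + 1) := by
      rw [List.drop_eq_getElem_cons hk, List.getD_eq_getElem?_getD, List.getElem?_eq_getElem hk]
      rfl
    rw [hd]
    rw [PySem.List.enumerate_cons, List.foldl_cons]
    have hcast : (k : Int) + 1 = ((k + 1 : Nat) : Int) := by push_cast; ring
    have htn : ((k : Int)).toNat = k := by omega
    rw [hcast, htn]
    have := ih (k + 1) i (out ++ List.replicate (i - prev - 1).toNat '-' ++ [exp.getD k ' '])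
      (by simp at hlen ⊢; omega)
    rw [this]
    rw [pvRender]
    have e1 : i - (prev + 1) = i - prev - 1 := by ring
    rw [e1]
    simp [List.append_assoc]

-- ===== VERDICT (by name: the statement is the Claim_ definition above) =====
theorem bananas_gen_spec : Claim_equal_bananas_gen := by
  intro s expected _
  unfold Spec_bananas_gen bananas_gen bananas_gen_alt
  congr 1
  have hA := pvA_char s.toList expected.toList 0 (Nat.zero_le _)
  simp only [List.drop_zero, Nat.cast_zero, zero_sub] at hA
  rw [hA]
  unfold bananasB
  rw [pvB_levels]
  simp only [List.flatMap_cons, List.flatMap_nil, List.append_nil, List.map_map]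
  apply List.map_congr_left
  intro q hq
  have hlen := pvPos_length s.toList expected.toList (-1) q hq
  have hr := pvB_render (s.toList.length : Int) expected.toList q 0 (-1) [] (by omega)
  simp only [Nat.cast_zero, List.drop_zero, List.nil_append, neg_add_cancel] at hr
  simpa using hr.symm
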